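-- pv_equiv track=rewrite | github.com/arifkhan1990/Competitive-Programming | Codingninjas/Multidimensional Array/Find All Sub-Square Of Size K.py | sumOfKxKMatrices
-- ===== SOURCE A (Python) =====
-- def sumOfKxKMatrices(arr:list, k:int):
--     res = []
--     n = len(arr)
--     if k > n:
--         return
--
--     subSumMat = [[None] * n for i in range(n) ]
--
--     for j in range(n):
--         s = 0
--
--         for i in range(k):
--             s += arr[i][j]
--         subSumMat[0][j] = s
--
--         for i in range(1, n-k+1):
--             s += arr[i+k-1][j] - arr[i-1][j]
--             subSumMat[i][j] = s
--
--     for i in range(n-k+1):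
--         s = 0
--         rs = []
--         for j in range(k):
--             s += subSumMat[i][j]
--         rs.append(s)
--
--
--         for j in range(1,n - k +1):
--             s += subSumMat[i][j+k-1] - subSumMat[i][j-1]
--             rs.append(s)
--         res.append(rs)
--
--
--     return res
-- ===== SOURCE B (Python) =====
-- def sumOfKxKMatrices(arr: list, k: int):
--     n = len(arr)
--     if k > n:
--         return
--     # per-row prefix sums over the first n columns
--     pref = []
--     for row in arr:
--         p = [0]
--         s = 0
--         for j in range(n):
--             s += row[j]
--             p.append(s)
--         pref.append(p)
--     m = n - k + 1
--     return [[sum(pref[i + a][j + k] - pref[i + a][j] for a in range(k))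
--              for j in range(m)] for i in range(m)]
-- ===== Notes on version B (the rewrite author's own statement) =====
-- stated objective: simpler
-- what changed: A makes two sliding-window passes (vertical window sums stored in an intermediate n*n matrix, then horizontal window sums over it); B instead builds per-row prefix sums once and reads each block sum directly by inclusion-exclusion on k row segments, with the result assembled by comprehensions instead of append loops.
import Mathlib
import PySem

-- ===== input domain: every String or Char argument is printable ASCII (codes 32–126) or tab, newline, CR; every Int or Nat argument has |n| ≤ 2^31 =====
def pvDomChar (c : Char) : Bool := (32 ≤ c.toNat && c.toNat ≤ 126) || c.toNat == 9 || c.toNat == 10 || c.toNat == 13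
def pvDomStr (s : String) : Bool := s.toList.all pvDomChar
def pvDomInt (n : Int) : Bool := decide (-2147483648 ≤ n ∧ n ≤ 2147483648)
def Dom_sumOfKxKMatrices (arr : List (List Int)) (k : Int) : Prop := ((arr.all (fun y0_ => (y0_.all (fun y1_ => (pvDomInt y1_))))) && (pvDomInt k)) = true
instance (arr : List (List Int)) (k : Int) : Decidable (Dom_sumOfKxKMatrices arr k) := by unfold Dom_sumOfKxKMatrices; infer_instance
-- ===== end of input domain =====

-- B replaces A's two sliding-window passes by per-row prefix sums queried by
-- inclusion-exclusion (objective: simpler — shorter and plainer, same results).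

-- ===== PORT A =====
-- helper for the Python statement `subSumMat[i][j] = v` (indices nonnegative under Pre_)
def pySet2 (m : List (List (Option Int))) (i j : Nat) (v : Option Int) : List (List (Option Int)) :=
  m.set i ((m.getD i []).set j v)

def sumOfKxKMatrices (arr : List (List Int)) (k : Int) : Option (List (List Int)) :=
  let n : Int := arr.length
  if k > n then none
  else
    -- subSumMat = [[None] * n for i in range(n)]
    let sub0 : List (List (Option Int)) :=
      (PySem.List.pyRange 0 n 1).map (fun _ => List.replicate arr.length (none : Option Int))
    -- first pass: vertical sliding window, column by column
    let sub1 := (PySem.List.pyRange 0 n 1).foldl (fun sub j =>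
      let s0 := (PySem.List.pyRange 0 k 1).foldl
        (fun s i => s + PySem.List.pyGetD (PySem.List.pyGetD arr i []) j 0) 0
      let sub' := pySet2 sub 0 j.toNat (some s0)
      ((PySem.List.pyRange 1 (n - k + 1) 1).foldl
        (fun (p : Int × List (List (Option Int))) i =>
          (p.1 + PySem.List.pyGetD (PySem.List.pyGetD arr (i + k - 1) []) j 0
               - PySem.List.pyGetD (PySem.List.pyGetD arr (i - 1) []) j 0,
           pySet2 p.2 i.toNat j.toNat
             (some (p.1 + PySem.List.pyGetD (PySem.List.pyGetD arr (i + k - 1) []) j 0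
                        - PySem.List.pyGetD (PySem.List.pyGetD arr (i - 1) []) j 0))))
        (s0, sub')).2) sub0
    -- second pass: horizontal sliding window over subSumMat, row by row
    let res := (PySem.List.pyRange 0 (n - k + 1) 1).foldl (fun res i =>
      let s0 := (PySem.List.pyRange 0 k 1).foldl
        (fun s j => s + (PySem.List.pyGetD (PySem.List.pyGetD sub1 i []) j none).getD 0) 0
      res ++ [((PySem.List.pyRange 1 (n - k + 1) 1).foldl
        (fun (p : Int × List Int) j =>
          (p.1 + (PySem.List.pyGetD (PySem.List.pyGetD sub1 i []) (j + k - 1) none).getD 0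
               - (PySem.List.pyGetD (PySem.List.pyGetD sub1 i []) (j - 1) none).getD 0,
           p.2 ++ [p.1 + (PySem.List.pyGetD (PySem.List.pyGetD sub1 i []) (j + k - 1) none).getD 0
                       - (PySem.List.pyGetD (PySem.List.pyGetD sub1 i []) (j - 1) none).getD 0]))
        (s0, [s0])).2]) []
    some res

-- ===== PORT B =====
def sumOfKxKMatrices_alt (arr : List (List Int)) (k : Int) : Option (List (List Int)) :=
  let n : Int := arr.length
  if k > n then none
  else
    -- per-row prefix sums over the first n columns
    let pref : List (List Int) := arr.foldl (fun pref row =>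
      pref ++ [((PySem.List.pyRange 0 n 1).foldl
        (fun (ps : List Int × Int) j =>
          (ps.1 ++ [ps.2 + PySem.List.pyGetD row j 0], ps.2 + PySem.List.pyGetD row j 0))
        ([0], 0)).1]) []
    let m := n - k + 1
    some ((PySem.List.pyRange 0 m 1).map (fun i =>
      (PySem.List.pyRange 0 m 1).map (fun j =>
        ((PySem.List.pyRange 0 k 1).map (fun a =>
          PySem.List.pyGetD (PySem.List.pyGetD pref (i + a) []) (j + k) 0
          - PySem.List.pyGetD (PySem.List.pyGetD pref (i + a) []) j 0)).sum)))

-- ===== PRECONDITION & SPEC =====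
-- Pre_ excludes exactly the inputs on which A raises IndexError: k < 0; k = 0 on a
-- nonempty matrix; and, when k ≤ len(arr), a row shorter than len(arr).
def Pre_sumOfKxKMatrices (arr : List (List Int)) (k : Int) : Prop :=
  0 ≤ k ∧ (arr = [] ∨ 1 ≤ k) ∧
    ((arr.length : Int) < k ∨ ∀ row ∈ arr, arr.length ≤ row.length)
instance (arr : List (List Int)) (k : Int) : Decidable (Pre_sumOfKxKMatrices arr k) := by
  unfold Pre_sumOfKxKMatrices; infer_instance

def pvWitness_sumOfKxKMatrices : List (List Int) × Int := ([[1, 2], [3, 4]], 2)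

def Spec_sumOfKxKMatrices (arr : List (List Int)) (k : Int) (out : Option (List (List Int))) : Prop := out = sumOfKxKMatrices_alt arr k
instance (arr : List (List Int)) (k : Int) (out : Option (List (List Int))) : Decidable (Spec_sumOfKxKMatrices arr k out) := by unfold Spec_sumOfKxKMatrices; infer_instance

-- ===== CLAIM (what is proved, stated in full; the proofs are below) =====
def Claim_equal_sumOfKxKMatrices : Prop := ∀ (arr : List (List Int)) (k : Int), Dom_sumOfKxKMatrices arr k → Pre_sumOfKxKMatrices arr k → Spec_sumOfKxKMatrices arr k (sumOfKxKMatrices arr k)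

-- ===== LEMMAS AND PROOFS =====

-- entry (i, j) of the matrix; under Pre_ every access is in range
def entE (arr : List (List Int)) (i j : Nat) : Int := (arr.getD i []).getD j 0
-- sum of the K entries of column j starting at row i
def colSum (arr : List (List Int)) (K i j : Nat) : Int :=
  ((List.range K).map (fun a => entE arr (i + a) j)).sum
-- sum of the K×K block with top-left corner (i, j)
def blockSum (arr : List (List Int)) (K i j : Nat) : Int :=
  ((List.range K).map (fun b => colSum arr K i (j + b))).sum
-- entry (i, j) of the intermediate matrix
def get2 (m : List (List (Option Int))) (i j : Nat) : Option Int := (m.getD i []).getD j none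
-- prefix sum of the first t entries of a row
def rowPre (row : List Int) (t : Nat) : Int :=
  ((List.range t).map (fun b => row.getD b 0)).sum


lemma sum_shift (f : Nat → Int) (K i : Nat) :
    ((List.range K).map (fun a => f (i + 1 + a))).sum
      = ((List.range K).map (fun a => f (i + a))).sum + f (i + K) - f i := by
  have h1 : ((List.range (K + 1)).map (fun a => f (i + a))).sum
      = ((List.range K).map (fun a => f (i + a))).sum + f (i + K) := by
    simp [List.range_succ]
  have h2 : ((List.range (K + 1)).map (fun a => f (i + a))).sum
      = f i + ((List.range K).map (fun a => f (i + 1 + a))).sum := by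
    have he : K + 1 = 1 + K := by omega
    rw [he, List.range_add]
    simp only [List.map_append, List.sum_append, List.range_one, List.map_map, List.map_cons,
      List.map_nil, List.sum_cons, List.sum_nil]
    have : (List.map ((fun a => f (i + a)) ∘ fun x => 1 + x) (List.range K))
        = List.map (fun a => f (i + 1 + a)) (List.range K) := by
      apply List.map_congr_left; intro a _; simp only [Function.comp]; congr 1; omega
    rw [this]; norm_num
  omega

lemma sum_swap (n m : Nat) (h : Nat → Nat → Int) :
    ((List.range n).map (fun x => ((List.range m).map (fun y => h x y)).sum)).sum
      = ((List.range m).map (fun y => ((List.range n).map (fun x => h x y)).sum)).sum := by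
  induction n with
  | zero => simp
  | succ n ih =>
    rw [List.range_succ]
    simp only [List.map_append, List.sum_append, List.map_cons, List.map_nil, List.sum_cons,
      List.sum_nil, add_zero]
    rw [ih]
    rw [PySem.List.sum_map_add_int]

lemma slideInt {σ : Type} (f g : Int → Int) (W : Int → Int) (upd : σ → Int → Int → σ) :
    ∀ (cnt : Nat) (a : Int) (acc : σ),
    (∀ i : Int, a ≤ i → i < a + cnt → W i = W (i - 1) + f i - g i) →
    List.foldl (fun (p : Int × σ) (i : Int) =>
        (p.1 + f i - g i, upd p.2 i (p.1 + f i - g i)))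
      (W (a - 1), acc) (PySem.List.pyRange a (a + (cnt : Int)) 1)
    = (W (a - 1 + cnt),
       List.foldl (fun acc i => upd acc i (W i)) acc (PySem.List.pyRange a (a + (cnt : Int)) 1)) := by
  intro cnt
  induction cnt with
  | zero =>
    intro a acc _
    rw [PySem.List.pyRange_one_eq_nil (by omega)]
    simp
  | succ cnt ih =>
    intro a acc hW
    rw [PySem.List.pyRange_one_cons (by push_cast; omega : a < a + ((cnt : Nat) + 1 : Nat))]
    simp only [List.foldl_cons]
    have ha : W (a - 1) + f a - g a = W a := by
      rw [hW a (le_refl a) (by push_cast; omega)]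
    rw [ha]
    have hr : a + (((cnt + 1 : Nat)) : Int) = (a + 1) + (cnt : Int) := by push_cast; ring
    rw [hr]
    have h1 : W ((a + 1) - 1) = W a := by norm_num
    rw [← h1]
    rw [ih (a + 1) (upd acc a (W (a + 1 - 1)))
      (fun i hi1 hi2 => hW i (by omega) (by push_cast at hi2 ⊢; omega))]
    have h2 : a + 1 - 1 + (cnt : Int) = a - 1 + ((cnt + 1 : Nat) : Int) := by push_cast; ring
    rw [h2]


lemma length_pySet2 (m : List (List (Option Int))) (r c : Nat) (v : Option Int) :
    (pySet2 m r c v).length = m.length := by simp [pySet2]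

lemma getD_pySet2 (m : List (List (Option Int))) (r c r' : Nat) (v : Option Int) :
    (pySet2 m r c v).getD r' [] =
      if r = r' ∧ r < m.length then (m.getD r []).set c v else m.getD r' [] := by
  simp only [pySet2, List.getD_eq_getElem?_getD, List.getElem?_set]
  by_cases h1 : r = r'
  · subst h1
    by_cases h2 : r < m.length
    · simp [h2]
    · simp [h2]
  · simp [h1]

lemma rowlen_pySet2 (m : List (List (Option Int))) (r c r' : Nat) (v : Option Int) :
    ((pySet2 m r c v).getD r' []).length = (m.getD r' []).length := by
  rw [getD_pySet2]
  split_ifs with h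
  · obtain ⟨h1, _⟩ := h; subst h1; simp
  · rfl

lemma get2_pySet2_ne (m : List (List (Option Int))) (r c i j : Nat) (v : Option Int)
    (h : i ≠ r ∨ j ≠ c) : get2 (pySet2 m r c v) i j = get2 m i j := by
  unfold get2
  rw [getD_pySet2]
  split_ifs with hh
  · obtain ⟨h1, h2⟩ := hh; subst h1
    rcases h with h | h
    · omega
    · rw [List.getD_eq_getElem?_getD, List.getElem?_set, List.getD_eq_getElem?_getD]
      simp [Ne.symm h]
  · rfl

lemma get2_pySet2_self (m : List (List (Option Int))) (r c : Nat) (v : Option Int)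
    (hr : r < m.length) (hc : c < (m.getD r []).length) :
    get2 (pySet2 m r c v) r c = v := by
  unfold get2
  rw [getD_pySet2]
  simp only [List.getD_eq_getElem?_getD, List.getElem?_eq_getElem hr, Option.getD_some] at hc
  simp [hr, List.getD_eq_getElem?_getD, hc]

lemma writes_get (jcol : Nat) (V : Nat → Int) :
    ∀ (cnt off : Nat) (m : List (List (Option Int))),
    (∀ r, r < m.length → jcol < (m.getD r []).length) →
    (List.foldl (fun acc t => pySet2 acc (off + t) jcol (some (V (off + t)))) m (List.range cnt)).length = m.length
    ∧ (∀ r', ((List.foldl (fun acc t => pySet2 acc (off + t) jcol (some (V (off + t)))) m (List.range cnt)).getD r' []).length = (m.getD r' []).length)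
    ∧ (∀ i j', (i < off ∨ off + cnt ≤ i ∨ j' ≠ jcol) →
        get2 (List.foldl (fun acc t => pySet2 acc (off + t) jcol (some (V (off + t)))) m (List.range cnt)) i j' = get2 m i j')
    ∧ (∀ i, off ≤ i → i < off + cnt → i < m.length →
        get2 (List.foldl (fun acc t => pySet2 acc (off + t) jcol (some (V (off + t)))) m (List.range cnt)) i jcol = some (V i)) := by
  intro cnt
  induction cnt with
  | zero => intro off m hj; simp; omega
  | succ cnt ih =>
    intro off m hj
    obtain ⟨ihl, ihrl, ihne, ihval⟩ := ih off m hj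
    rw [List.range_succ, List.foldl_append, List.foldl_cons, List.foldl_nil]
    set mc := List.foldl (fun acc t => pySet2 acc (off + t) jcol (some (V (off + t)))) m (List.range cnt) with hmc
    refine ⟨?_, ?_, ?_, ?_⟩
    · rw [length_pySet2, ihl]
    · intro r'; rw [rowlen_pySet2, ihrl]
    · intro i j' h
      have h1 : i ≠ off + cnt ∨ j' ≠ jcol := by
        rcases h with h | h | h
        · left; omega
        · left; omega
        · right; exact h
      have h2 : i < off ∨ off + cnt ≤ i ∨ j' ≠ jcol := by
        rcases h with h | h | h
        · left; omega
        · right; left; omega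
        · right; right; exact h
      rw [get2_pySet2_ne _ _ _ _ _ _ h1, ihne i j' h2]
    · intro i h1 h2 h3
      by_cases hi : i = off + cnt
      · subst hi
        rw [get2_pySet2_self _ _ _ _ (by rw [ihl]; omega) (by rw [ihrl]; exact hj _ (by omega))]
      · rw [get2_pySet2_ne _ _ _ _ _ _ (by omega)]
        exact ihval i h1 (by omega) h3

lemma getD_map_lt (f : List Int → List Int) (l : List (List Int)) (r : Nat) (h : r < l.length) :
    (l.map f).getD r [] = f (l.getD r []) := by
  rw [List.getD_eq_getElem?_getD, List.getElem?_map, List.getElem?_eq_getElem h,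
    List.getD_eq_getElem?_getD, List.getElem?_eq_getElem h]
  rfl

lemma rowPre_succ (row : List Int) (t : Nat) :
    rowPre row (t + 1) = rowPre row t + row.getD t 0 := by
  simp [rowPre, List.range_succ]

lemma rowPre_sub (row : List Int) (j K : Nat) :
    rowPre row (j + K) - rowPre row j = ((List.range K).map (fun b => row.getD (j + b) 0)).sum := by
  rw [rowPre, List.range_add, List.map_append, List.sum_append, List.map_map]
  rw [show rowPre row j = ((List.range j).map (fun b => row.getD b 0)).sum from rfl]
  ring_nf
  rfl

lemma prefFold (row : List Int) :
    ∀ c : Nat,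
    List.foldl (fun (ps : List Int × Int) (j : Nat) =>
        (ps.1 ++ [ps.2 + PySem.List.pyGetD row (j : Int) 0], ps.2 + PySem.List.pyGetD row (j : Int) 0))
      ([0], 0) (List.range c)
    = ((List.range (c + 1)).map (fun t => rowPre row t), rowPre row c) := by
  intro c
  induction c with
  | zero => simp [rowPre]
  | succ c ih =>
    rw [List.range_succ, List.foldl_append, ih, List.foldl_cons, List.foldl_nil]
    rw [PySem.List.pyGetD_natCast, ← rowPre_succ]
    rw [List.range_succ (n := c + 1), List.map_append]
    rfl

lemma portB (arr : List (List Int)) (k : Int) (hk : 1 ≤ k) (hkn : k ≤ (arr.length : Int)) :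
    sumOfKxKMatrices_alt arr k
      = some ((List.range (arr.length - k.toNat + 1)).map (fun i =>
          (List.range (arr.length - k.toNat + 1)).map (fun j => blockSum arr k.toNat i j))) := by
  have hkK : k = (k.toNat : Int) := (Int.toNat_of_nonneg (by omega)).symm
  have hK1 : 1 ≤ k.toNat := by omega
  have hKN : k.toNat ≤ arr.length := by omega
  simp only [sumOfKxKMatrices_alt]
  rw [if_neg (by omega : ¬ k > (arr.length : Int))]
  have hpref :
      List.foldl
        (fun pref row =>
          pref ++
            [(List.foldl
                  (fun (ps : List Int × Int) j =>
                    (ps.1 ++ [ps.2 + PySem.List.pyGetD row j 0], ps.2 + PySem.List.pyGetD row j 0))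
                  ([0], 0) (PySem.List.pyRange 0 (arr.length : Int))).1])
        [] arr
      = arr.map (fun row => (List.range (arr.length + 1)).map (fun t => rowPre row t)) := by
    rw [PySem.List.foldl_append_singleton_eq_map
      (f := fun row => (List.foldl
          (fun (ps : List Int × Int) j =>
            (ps.1 ++ [ps.2 + PySem.List.pyGetD row j 0], ps.2 + PySem.List.pyGetD row j 0))
          ([0], 0) (PySem.List.pyRange 0 (arr.length : Int))).1)]
    rw [List.nil_append]
    apply List.map_congr_left
    intro row _
    rw [PySem.List.pyRange_zero_natCast, List.foldl_map, prefFold]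
  rw [hpref]
  have hMb : ((arr.length : Int) - k + 1) = ((arr.length - k.toNat + 1 : Nat) : Int) := by
    push_cast; omega
  rw [hMb, PySem.List.pyRange_zero_natCast, List.map_map]
  congr 1
  apply List.map_congr_left
  intro ti hti
  rw [List.mem_range] at hti
  simp only [Function.comp_def]
  rw [List.map_map]
  apply List.map_congr_left
  intro tj htj
  rw [List.mem_range] at htj
  simp only [Function.comp_def]
  rw [hkK, PySem.List.pyRange_zero_natCast, List.map_map]
  simp only [Function.comp_def]
  have helem : ∀ ta < k.toNat,
      PySem.List.pyGetD
          (PySem.List.pyGetD (arr.map (fun row => (List.range (arr.length + 1)).map (fun t => rowPre row t)))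
            ((ti : Int) + (ta : Int)) [])
          ((tj : Int) + (k.toNat : Int)) 0 -
        PySem.List.pyGetD
          (PySem.List.pyGetD (arr.map (fun row => (List.range (arr.length + 1)).map (fun t => rowPre row t)))
            ((ti : Int) + (ta : Int)) [])
          (tj : Int) 0
      = ((List.range k.toNat).map (fun b => entE arr (ti + ta) (tj + b))).sum := by
    intro ta hta
    have hidx : ti + ta < arr.length := by omega
    rw [show ((ti : Int) + (ta : Int)) = ((ti + ta : Nat) : Int) by push_cast; ring]
    rw [show ((tj : Int) + (k.toNat : Int)) = ((tj + k.toNat : Nat) : Int) by push_cast; ring]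
    rw [PySem.List.pyGetD_natCast, PySem.List.pyGetD_natCast, PySem.List.pyGetD_natCast]
    rw [getD_map_lt _ _ _ hidx]
    rw [PySem.List.getD_map_range _ _ _ _ (by omega), PySem.List.getD_map_range _ _ _ _ (by omega)]
    rw [rowPre_sub]
    rfl
  calc ((List.range k.toNat).map (fun (ta : Nat) =>
          PySem.List.pyGetD
              (PySem.List.pyGetD (arr.map (fun row => (List.range (arr.length + 1)).map (fun t => rowPre row t)))
                ((ti : Int) + (ta : Int)) [])
              ((tj : Int) + (k.toNat : Int)) 0 -
            PySem.List.pyGetD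
              (PySem.List.pyGetD (arr.map (fun row => (List.range (arr.length + 1)).map (fun t => rowPre row t)))
                ((ti : Int) + (ta : Int)) [])
              (tj : Int) 0)).sum
      = ((List.range k.toNat).map (fun (ta : Nat) =>
          ((List.range k.toNat).map (fun b => entE arr (ti + ta) (tj + b))).sum)).sum := by
        congr 1
        apply List.map_congr_left
        intro ta hta
        exact helem ta (List.mem_range.mp hta)
    _ = blockSum arr k.toNat ti tj := by
        rw [sum_swap]
        rfl

lemma map_const_range (n : Nat) (x : List (Option Int)) :
    (List.range n).map (fun _ => x) = List.replicate n x := by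
  induction n with
  | zero => simp
  | succ n ih => rw [List.range_succ, List.map_append, ih, List.replicate_succ']; rfl

lemma map_range_shift (h : Nat → Int) (c : Nat) :
    (List.range (c + 1)).map h = h 0 :: (List.range c).map (fun u => h (1 + u)) := by
  rw [show c + 1 = 1 + c by omega, List.range_add, List.map_append, List.map_map]
  rfl

lemma colstep (arr : List (List Int)) (k : Int) (hk : 1 ≤ k) (hkn : k ≤ (arr.length : Int))
    (m : List (List (Option Int))) (jn : Nat) (hjn : jn < arr.length)
    (hlen : m.length = arr.length)
    (hrlen : ∀ r, r < arr.length → (m.getD r []).length = arr.length) :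
    ((List.foldl
        (fun (p : Int × List (List (Option Int))) i =>
          (p.1 + PySem.List.pyGetD (PySem.List.pyGetD arr (i + k - 1) []) ((jn : Int)) 0 -
              PySem.List.pyGetD (PySem.List.pyGetD arr (i - 1) []) ((jn : Int)) 0,
            pySet2 p.2 i.toNat jn
              (some
                (p.1 + PySem.List.pyGetD (PySem.List.pyGetD arr (i + k - 1) []) ((jn : Int)) 0 -
                  PySem.List.pyGetD (PySem.List.pyGetD arr (i - 1) []) ((jn : Int)) 0))))
        ((List.foldl (fun s i => s + PySem.List.pyGetD (PySem.List.pyGetD arr i []) ((jn : Int)) 0) 0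
            (PySem.List.pyRange 0 k),
          pySet2 m 0 jn
            (some
              (List.foldl (fun s i => s + PySem.List.pyGetD (PySem.List.pyGetD arr i []) ((jn : Int)) 0) 0
                (PySem.List.pyRange 0 k)))))
        (PySem.List.pyRange 1 ((arr.length : Int) - k + 1))).2).length = arr.length
    ∧ (∀ r, r < arr.length → ((((List.foldl
        (fun (p : Int × List (List (Option Int))) i =>
          (p.1 + PySem.List.pyGetD (PySem.List.pyGetD arr (i + k - 1) []) ((jn : Int)) 0 -
              PySem.List.pyGetD (PySem.List.pyGetD arr (i - 1) []) ((jn : Int)) 0,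
            pySet2 p.2 i.toNat jn
              (some
                (p.1 + PySem.List.pyGetD (PySem.List.pyGetD arr (i + k - 1) []) ((jn : Int)) 0 -
                  PySem.List.pyGetD (PySem.List.pyGetD arr (i - 1) []) ((jn : Int)) 0))))
        ((List.foldl (fun s i => s + PySem.List.pyGetD (PySem.List.pyGetD arr i []) ((jn : Int)) 0) 0
            (PySem.List.pyRange 0 k),
          pySet2 m 0 jn
            (some
              (List.foldl (fun s i => s + PySem.List.pyGetD (PySem.List.pyGetD arr i []) ((jn : Int)) 0) 0
                (PySem.List.pyRange 0 k)))))
        (PySem.List.pyRange 1 ((arr.length : Int) - k + 1))).2).getD r []).length = arr.length))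
    ∧ (∀ i j', j' ≠ jn → get2 ((List.foldl
        (fun (p : Int × List (List (Option Int))) i =>
          (p.1 + PySem.List.pyGetD (PySem.List.pyGetD arr (i + k - 1) []) ((jn : Int)) 0 -
              PySem.List.pyGetD (PySem.List.pyGetD arr (i - 1) []) ((jn : Int)) 0,
            pySet2 p.2 i.toNat jn
              (some
                (p.1 + PySem.List.pyGetD (PySem.List.pyGetD arr (i + k - 1) []) ((jn : Int)) 0 -
                  PySem.List.pyGetD (PySem.List.pyGetD arr (i - 1) []) ((jn : Int)) 0))))
        ((List.foldl (fun s i => s + PySem.List.pyGetD (PySem.List.pyGetD arr i []) ((jn : Int)) 0) 0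
            (PySem.List.pyRange 0 k),
          pySet2 m 0 jn
            (some
              (List.foldl (fun s i => s + PySem.List.pyGetD (PySem.List.pyGetD arr i []) ((jn : Int)) 0) 0
                (PySem.List.pyRange 0 k)))))
        (PySem.List.pyRange 1 ((arr.length : Int) - k + 1))).2) i j' = get2 m i j')
    ∧ (∀ i, i < arr.length - k.toNat + 1 →
        get2 ((List.foldl
        (fun (p : Int × List (List (Option Int))) i =>
          (p.1 + PySem.List.pyGetD (PySem.List.pyGetD arr (i + k - 1) []) ((jn : Int)) 0 -
              PySem.List.pyGetD (PySem.List.pyGetD arr (i - 1) []) ((jn : Int)) 0,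
            pySet2 p.2 i.toNat jn
              (some
                (p.1 + PySem.List.pyGetD (PySem.List.pyGetD arr (i + k - 1) []) ((jn : Int)) 0 -
                  PySem.List.pyGetD (PySem.List.pyGetD arr (i - 1) []) ((jn : Int)) 0))))
        ((List.foldl (fun s i => s + PySem.List.pyGetD (PySem.List.pyGetD arr i []) ((jn : Int)) 0) 0
            (PySem.List.pyRange 0 k),
          pySet2 m 0 jn
            (some
              (List.foldl (fun s i => s + PySem.List.pyGetD (PySem.List.pyGetD arr i []) ((jn : Int)) 0) 0
                (PySem.List.pyRange 0 k)))))
        (PySem.List.pyRange 1 ((arr.length : Int) - k + 1))).2) i jn = some (colSum arr k.toNat i jn)) := by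
  have hkK : k = (k.toNat : Int) := (Int.toNat_of_nonneg (by omega)).symm
  have hN1 : 1 ≤ arr.length := by omega
  have hs0 : List.foldl (fun s i => s + PySem.List.pyGetD (PySem.List.pyGetD arr i []) ((jn : Int)) 0) 0
      (PySem.List.pyRange 0 k) = colSum arr k.toNat 0 jn := by
    rw [hkK, PySem.List.pyRange_zero_natCast, List.foldl_map, PySem.List.foldl_add]
    simp only [PySem.List.pyGetD_natCast, zero_add]
    unfold colSum entE
    congr 1
    apply List.map_congr_left
    intro a _
    rw [Nat.zero_add]
  rw [hs0]
  have hb : ((arr.length : Int) - k + 1) = 1 + ((arr.length - k.toNat : Nat) : Int) := by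
    omega
  rw [hb]
  have hW : ∀ i : Int, 1 ≤ i → i < 1 + ((arr.length - k.toNat : Nat) : Int) →
      (fun i : Int => colSum arr k.toNat i.toNat jn) i
        = (fun i : Int => colSum arr k.toNat i.toNat jn) (i - 1)
          + (fun i => PySem.List.pyGetD (PySem.List.pyGetD arr (i + k - 1) []) ((jn : Int)) 0) i
          - (fun i => PySem.List.pyGetD (PySem.List.pyGetD arr (i - 1) []) ((jn : Int)) 0) i := by
    intro i h1 h2
    simp only []
    rw [show i = ((i.toNat : Nat) : Int) by omega]
    rw [show (((i.toNat : Nat) : Int) + k - 1) = ((i.toNat + k.toNat - 1 : Nat) : Int) by omega]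
    rw [show (((i.toNat : Nat) : Int) - 1) = ((i.toNat - 1 : Nat) : Int) by omega]
    simp only [PySem.List.pyGetD_natCast, Int.toNat_natCast]
    have hshift := sum_shift (fun x => entE arr x jn) k.toNat (i.toNat - 1)
    simp only [show i.toNat - 1 + 1 = i.toNat from by omega] at hshift
    rw [show i.toNat + k.toNat - 1 = i.toNat - 1 + k.toNat from by omega]
    calc colSum arr k.toNat i.toNat jn
        = colSum arr k.toNat (i.toNat - 1) jn + entE arr (i.toNat - 1 + k.toNat) jn
            - entE arr (i.toNat - 1) jn := hshift
      _ = _ := by unfold entE; ring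
  have hkey := slideInt
    (fun i => PySem.List.pyGetD (PySem.List.pyGetD arr (i + k - 1) []) ((jn : Int)) 0)
    (fun i => PySem.List.pyGetD (PySem.List.pyGetD arr (i - 1) []) ((jn : Int)) 0)
    (fun i : Int => colSum arr k.toNat i.toNat jn)
    (fun acc i s => pySet2 acc i.toNat jn (some s))
    (arr.length - k.toNat) 1
    (pySet2 m 0 jn (some (colSum arr k.toNat 0 jn)))
    hW
  simp only [] at hkey
  rw [show ((1 : Int) - 1).toNat = 0 from rfl] at hkey
  rw [hkey]
  -- residual fold normalisation
  have hres : List.foldl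
      (fun acc i => pySet2 acc i.toNat jn (some (colSum arr k.toNat i.toNat jn)))
      (pySet2 m 0 jn (some (colSum arr k.toNat 0 jn)))
      (PySem.List.pyRange 1 (1 + ((arr.length - k.toNat : Nat) : Int)))
      = List.foldl
      (fun acc t => pySet2 acc (1 + t) jn (some (colSum arr k.toNat (1 + t) jn)))
      (pySet2 m 0 jn (some (colSum arr k.toNat 0 jn)))
      (List.range (arr.length - k.toNat)) := by
    rw [PySem.List.pyRange_one, show ((1 : Int) + ((arr.length - k.toNat : Nat) : Int) - 1).toNat
      = arr.length - k.toNat from by omega, List.foldl_map]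
    apply PySem.List.foldl_congr_mem
    intro acc x _
    rw [show ((1 : Int) + (x : Int)).toNat = 1 + x from by omega]
  rw [hres]
  have hwr := writes_get jn (fun r => colSum arr k.toNat r jn) (arr.length - k.toNat) 1
    (pySet2 m 0 jn (some (colSum arr k.toNat 0 jn)))
    (by intro r hr
        rw [rowlen_pySet2, hrlen r (by rwa [length_pySet2, hlen] at hr)]
        exact hjn)
  simp only [] at hwr
  obtain ⟨w1, w2, w3, w4⟩ := hwr
  have hlen0 : (pySet2 m 0 jn (some (colSum arr k.toNat 0 jn))).length = arr.length := by
    rw [length_pySet2, hlen]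
  refine ⟨?_, ?_, ?_, ?_⟩
  · rw [w1, hlen0]
  · intro r hr
    rw [w2, rowlen_pySet2]
    exact hrlen r hr
  · intro i j' hne
    rw [w3 i j' (by tauto), get2_pySet2_ne _ _ _ _ _ _ (by tauto)]
  · intro i hi
    by_cases h0 : i = 0
    · subst h0
      rw [w3 0 jn (by omega)]
      exact get2_pySet2_self m 0 jn _ (by omega) (by rw [hrlen 0 (by omega)]; exact hjn)
    · exact w4 i (by omega) (by omega) (by omega)

set_option maxHeartbeats 1600000 in
lemma phase1 (arr : List (List Int)) (k : Int) (hk : 1 ≤ k) (hkn : k ≤ (arr.length : Int)) :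
    ∀ c, c ≤ arr.length →
    (List.foldl
        (fun (x : List (List (Option Int))) (y : Nat) =>
          (List.foldl
              (fun p i =>
                (p.1 + PySem.List.pyGetD (PySem.List.pyGetD arr (i + k - 1) []) (↑y) 0 -
                    PySem.List.pyGetD (PySem.List.pyGetD arr (i - 1) []) (↑y) 0,
                  pySet2 p.2 i.toNat y
                    (some
                      (p.1 + PySem.List.pyGetD (PySem.List.pyGetD arr (i + k - 1) []) (↑y) 0 -
                        PySem.List.pyGetD (PySem.List.pyGetD arr (i - 1) []) (↑y) 0))))
              (List.foldl (fun s i => s + PySem.List.pyGetD (PySem.List.pyGetD arr i []) (↑y) 0) 0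
                  (PySem.List.pyRange 0 k),
                pySet2 x 0 y
                  (some
                    (List.foldl (fun s i => s + PySem.List.pyGetD (PySem.List.pyGetD arr i []) (↑y) 0) 0
                      (PySem.List.pyRange 0 k))))
              (PySem.List.pyRange 1 (↑arr.length - k + 1))).2)
        (List.replicate arr.length (List.replicate arr.length none)) (List.range c)).length = arr.length
    ∧ (∀ r, r < arr.length → ((List.foldl
        (fun (x : List (List (Option Int))) (y : Nat) =>
          (List.foldl
              (fun p i =>
                (p.1 + PySem.List.pyGetD (PySem.List.pyGetD arr (i + k - 1) []) (↑y) 0 -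
                    PySem.List.pyGetD (PySem.List.pyGetD arr (i - 1) []) (↑y) 0,
                  pySet2 p.2 i.toNat y
                    (some
                      (p.1 + PySem.List.pyGetD (PySem.List.pyGetD arr (i + k - 1) []) (↑y) 0 -
                        PySem.List.pyGetD (PySem.List.pyGetD arr (i - 1) []) (↑y) 0))))
              (List.foldl (fun s i => s + PySem.List.pyGetD (PySem.List.pyGetD arr i []) (↑y) 0) 0
                  (PySem.List.pyRange 0 k),
                pySet2 x 0 y
                  (some
                    (List.foldl (fun s i => s + PySem.List.pyGetD (PySem.List.pyGetD arr i []) (↑y) 0) 0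
                      (PySem.List.pyRange 0 k))))
              (PySem.List.pyRange 1 (↑arr.length - k + 1))).2)
        (List.replicate arr.length (List.replicate arr.length none)) (List.range c)).getD r []).length = arr.length)
    ∧ (∀ i jn, i < arr.length - k.toNat + 1 → jn < c →
        get2 (List.foldl
        (fun (x : List (List (Option Int))) (y : Nat) =>
          (List.foldl
              (fun p i =>
                (p.1 + PySem.List.pyGetD (PySem.List.pyGetD arr (i + k - 1) []) (↑y) 0 -
                    PySem.List.pyGetD (PySem.List.pyGetD arr (i - 1) []) (↑y) 0,
                  pySet2 p.2 i.toNat y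
                    (some
                      (p.1 + PySem.List.pyGetD (PySem.List.pyGetD arr (i + k - 1) []) (↑y) 0 -
                        PySem.List.pyGetD (PySem.List.pyGetD arr (i - 1) []) (↑y) 0))))
              (List.foldl (fun s i => s + PySem.List.pyGetD (PySem.List.pyGetD arr i []) (↑y) 0) 0
                  (PySem.List.pyRange 0 k),
                pySet2 x 0 y
                  (some
                    (List.foldl (fun s i => s + PySem.List.pyGetD (PySem.List.pyGetD arr i []) (↑y) 0) 0
                      (PySem.List.pyRange 0 k))))
              (PySem.List.pyRange 1 (↑arr.length - k + 1))).2)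
        (List.replicate arr.length (List.replicate arr.length none)) (List.range c)) i jn = some (colSum arr k.toNat i jn)) := by
  intro c
  induction c with
  | zero =>
    intro _
    refine ⟨by simp, ?_, by omega⟩
    intro r hr
    rw [List.range_zero, List.foldl_nil, List.getD_eq_getElem?_getD, List.getElem?_replicate, if_pos hr]
    simp
  | succ c ih =>
    intro hc
    obtain ⟨ihl, ihr, ihv⟩ := ih (by omega)
    rw [List.range_succ, List.foldl_append, List.foldl_cons, List.foldl_nil]
    set mp := (List.foldl
        (fun (x : List (List (Option Int))) (y : Nat) =>
          (List.foldl
              (fun p i =>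
                (p.1 + PySem.List.pyGetD (PySem.List.pyGetD arr (i + k - 1) []) (↑y) 0 -
                    PySem.List.pyGetD (PySem.List.pyGetD arr (i - 1) []) (↑y) 0,
                  pySet2 p.2 i.toNat y
                    (some
                      (p.1 + PySem.List.pyGetD (PySem.List.pyGetD arr (i + k - 1) []) (↑y) 0 -
                        PySem.List.pyGetD (PySem.List.pyGetD arr (i - 1) []) (↑y) 0))))
              (List.foldl (fun s i => s + PySem.List.pyGetD (PySem.List.pyGetD arr i []) (↑y) 0) 0
                  (PySem.List.pyRange 0 k),
                pySet2 x 0 y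
                  (some
                    (List.foldl (fun s i => s + PySem.List.pyGetD (PySem.List.pyGetD arr i []) (↑y) 0) 0
                      (PySem.List.pyRange 0 k))))
              (PySem.List.pyRange 1 (↑arr.length - k + 1))).2)
        (List.replicate arr.length (List.replicate arr.length none)) (List.range c)) with hmp
    obtain ⟨c1, c2, c3, c4⟩ := colstep arr k hk hkn mp c (by omega) ihl ihr
    refine ⟨c1, c2, ?_⟩
    intro i jn hi hjn
    by_cases hj : jn = c
    · subst hj
      exact c4 i hi
    · rw [c3 i jn hj]
      exact ihv i jn hi (by omega)

lemma map_pyRange_shiftNat (h : Nat → Int) (cnt : Nat) :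
    (PySem.List.pyRange 1 (1 + (cnt : Int)) 1).map (fun j : Int => h j.toNat)
      = (List.range cnt).map (fun u => h (1 + u)) := by
  rw [PySem.List.pyRange_one, show ((1 : Int) + (cnt : Int) - 1).toNat = cnt by omega, List.map_map]
  apply List.map_congr_left
  intro x _
  simp only [Function.comp_def]
  rw [show ((1 : Int) + (x : Int)).toNat = 1 + x by omega]

set_option maxHeartbeats 1600000 in
lemma portA (arr : List (List Int)) (k : Int) (hk : 1 ≤ k) (hkn : k ≤ (arr.length : Int)) :
    sumOfKxKMatrices arr k
      = some ((List.range (arr.length - k.toNat + 1)).map (fun i =>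
          (List.range (arr.length - k.toNat + 1)).map (fun j => blockSum arr k.toNat i j))) := by
  have hkK : k = (k.toNat : Int) := (Int.toNat_of_nonneg (by omega)).symm
  have hK1 : 1 ≤ k.toNat := by omega
  have hKN : k.toNat ≤ arr.length := by omega
  simp only [sumOfKxKMatrices]
  rw [if_neg (by omega : ¬ k > (arr.length : Int))]
  simp only [PySem.List.pyRange_zero_natCast, List.foldl_map, List.map_map, Function.comp_def,
    Int.toNat_natCast, map_const_range]
  have hph := phase1 arr k hk hkn arr.length (le_refl _)
  set S := (List.foldl
        (fun (x : List (List (Option Int))) (y : Nat) =>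
          (List.foldl
              (fun p i =>
                (p.1 + PySem.List.pyGetD (PySem.List.pyGetD arr (i + k - 1) []) (↑y) 0 -
                    PySem.List.pyGetD (PySem.List.pyGetD arr (i - 1) []) (↑y) 0,
                  pySet2 p.2 i.toNat y
                    (some
                      (p.1 + PySem.List.pyGetD (PySem.List.pyGetD arr (i + k - 1) []) (↑y) 0 -
                        PySem.List.pyGetD (PySem.List.pyGetD arr (i - 1) []) (↑y) 0))))
              (List.foldl (fun s i => s + PySem.List.pyGetD (PySem.List.pyGetD arr i []) (↑y) 0) 0
                  (PySem.List.pyRange 0 k),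
                pySet2 x 0 y
                  (some
                    (List.foldl (fun s i => s + PySem.List.pyGetD (PySem.List.pyGetD arr i []) (↑y) 0) 0
                      (PySem.List.pyRange 0 k))))
              (PySem.List.pyRange 1 (↑arr.length - k + 1))).2)
        (List.replicate arr.length (List.replicate arr.length none)) (List.range arr.length)) with hS
  obtain ⟨hSlen, hSrow, hSval⟩ := hph
  unfold get2 at hSval
  rw [PySem.List.foldl_append_singleton_eq_map, List.nil_append]
  have hMb : ((arr.length : Int) - k + 1) = ((arr.length - k.toNat + 1 : Nat) : Int) := by
    push_cast; omega
  rw [hMb, PySem.List.pyRange_zero_natCast, List.map_map]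
  simp only [Function.comp_def]
  congr 1
  apply List.map_congr_left
  intro ti hti
  rw [List.mem_range] at hti
  have hs0r : List.foldl
      (fun s j => s + (PySem.List.pyGetD (PySem.List.pyGetD S ((ti : Nat) : Int) []) j none).getD 0) 0
      (PySem.List.pyRange 0 k) = blockSum arr k.toNat ti 0 := by
    rw [hkK, PySem.List.pyRange_zero_natCast, List.foldl_map, PySem.List.foldl_add]
    simp only [PySem.List.pyGetD_natCast, zero_add]
    have hm : (List.range k.toNat).map (fun x => ((S.getD ti []).getD x none).getD 0)
        = (List.range k.toNat).map (fun b => colSum arr k.toNat ti (0 + b)) := by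
      apply List.map_congr_left
      intro x hx
      rw [List.mem_range] at hx
      rw [hSval ti x hti (by omega)]
      rw [Nat.zero_add]
      rfl
    rw [hm]
    rfl
  rw [hs0r]
  rw [show ((arr.length - k.toNat + 1 : Nat) : Int) = 1 + ((arr.length - k.toNat : Nat) : Int)
    by omega]
  have hW2 : ∀ j : Int, 1 ≤ j → j < 1 + ((arr.length - k.toNat : Nat) : Int) →
      (fun j : Int => blockSum arr k.toNat ti j.toNat) j
        = (fun j : Int => blockSum arr k.toNat ti j.toNat) (j - 1)
          + (fun j => (PySem.List.pyGetD (PySem.List.pyGetD S ((ti : Nat) : Int) []) (j + k - 1) none).getD 0) j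
          - (fun j => (PySem.List.pyGetD (PySem.List.pyGetD S ((ti : Nat) : Int) []) (j - 1) none).getD 0) j := by
    intro j h1 h2
    simp only []
    rw [show j = ((j.toNat : Nat) : Int) by omega]
    rw [show (((j.toNat : Nat) : Int) + k - 1) = ((j.toNat + k.toNat - 1 : Nat) : Int) by omega]
    rw [show (((j.toNat : Nat) : Int) - 1) = ((j.toNat - 1 : Nat) : Int) by omega]
    simp only [PySem.List.pyGetD_natCast, Int.toNat_natCast]
    rw [hSval ti (j.toNat + k.toNat - 1) hti (by omega), hSval ti (j.toNat - 1) hti (by omega)]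
    simp only [Option.getD_some]
    have hshift := sum_shift (fun x => colSum arr k.toNat ti x) k.toNat (j.toNat - 1)
    simp only [show j.toNat - 1 + 1 = j.toNat from by omega] at hshift
    rw [show j.toNat + k.toNat - 1 = j.toNat - 1 + k.toNat from by omega]
    exact hshift
  have hkey2 := slideInt
    (fun j => (PySem.List.pyGetD (PySem.List.pyGetD S ((ti : Nat) : Int) []) (j + k - 1) none).getD 0)
    (fun j => (PySem.List.pyGetD (PySem.List.pyGetD S ((ti : Nat) : Int) []) (j - 1) none).getD 0)
    (fun j : Int => blockSum arr k.toNat ti j.toNat)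
    (fun acc j s => acc ++ [s])
    (arr.length - k.toNat) 1 [blockSum arr k.toNat ti 0] hW2
  simp only [] at hkey2
  rw [show ((1 : Int) - 1).toNat = 0 from rfl] at hkey2
  rw [hkey2]
  rw [PySem.List.foldl_append_singleton_eq_map]
  rw [map_pyRange_shiftNat (fun u => blockSum arr k.toNat ti u) (arr.length - k.toNat)]
  rw [map_range_shift (fun j => blockSum arr k.toNat ti j) (arr.length - k.toNat)]
  rfl


-- ===== VERDICT (by name: the statement is the Claim_ definition above) =====
theorem sumOfKxKMatrices_spec : Claim_equal_sumOfKxKMatrices := by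
  intro arr k _ hpre
  obtain ⟨hk0, hek, hsq⟩ := hpre
  unfold Spec_sumOfKxKMatrices
  by_cases hbig : (arr.length : Int) < k
  · unfold sumOfKxKMatrices sumOfKxKMatrices_alt
    rw [if_pos (by exact hbig), if_pos (by exact hbig)]
  · rw [not_lt] at hbig
    rcases hek with hnil | hk1
    · subst hnil
      have : k = 0 := by simp at hbig; omega
      subst this
      decide
    · rcases hsq with h | hrows
      · omega
      · rw [portA arr k hk1 hbig, portB arr k hk1 hbig]
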